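-- pv_equiv track=rewrite | github.com/leila100/coding-exercises | codeSignal/theCore/SpringOfIntegration/beautifulText.py | beautifulText
-- ===== SOURCE A (Python) =====
-- def beautifulText(inputString, l, r):
--     substrings = inputString.split(" ")
--     substringsLengths = [len(s) for s in substrings]
--     # go through length in substringsLengths and try to find a combination of lengths that add up to same total length
--     # Have to remember to add back the spaces betweeen te words
--     currentTotalLength = 0
--     index = 0
--     while index < len(substringsLengths)-1:
--         nextSub = substringsLengths[:index+1]
--         currentTotalLength = sum(nextSub) + index # add index to account for the white spaces
--         sumLen = 0
--         for i in range(index+1, len(substringsLengths)):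
--             sumLen += substringsLengths[i]
--             if sumLen == currentTotalLength:
--                 if i == len(substringsLengths)-1 and currentTotalLength <= r and currentTotalLength >= l:
--                     return True
--                 sumLen = 0
--             elif sumLen > currentTotalLength:
--                 break
--             else:
--                 sumLen += 1 # Adding the white space char
--         index += 1
--     return False
-- ===== SOURCE B (Python) =====
-- def beautifulText(inputString, l, r):
--     words = inputString.split(" ")
--     n = len(words)
--     cum = []
--     total = -1
--     for w in words:
--         total += len(w) + 1
--         cum.append(total)
--     boundaries = set(cum)
--     L = cum[-1]
--     for idx in range(n - 1):
--         T = cum[idx]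
--         if l <= T <= r and (L + 1) % (T + 1) == 0:
--             k = (L + 1) // (T + 1)
--             if all(m * (T + 1) - 1 in boundaries for m in range(1, k + 1)):
--                 return True
--     return False
-- ===== Notes on version B (the rewrite author's own statement) =====
-- stated objective: alternative
-- what changed: Replaces A's greedy inner rescan per start index by prefix-sum arithmetic: precompute cumulative display lengths once, then for each candidate first-block length T check divisibility of the total display length by T+1 and set membership of every block-boundary prefix value.
import Mathlib
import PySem

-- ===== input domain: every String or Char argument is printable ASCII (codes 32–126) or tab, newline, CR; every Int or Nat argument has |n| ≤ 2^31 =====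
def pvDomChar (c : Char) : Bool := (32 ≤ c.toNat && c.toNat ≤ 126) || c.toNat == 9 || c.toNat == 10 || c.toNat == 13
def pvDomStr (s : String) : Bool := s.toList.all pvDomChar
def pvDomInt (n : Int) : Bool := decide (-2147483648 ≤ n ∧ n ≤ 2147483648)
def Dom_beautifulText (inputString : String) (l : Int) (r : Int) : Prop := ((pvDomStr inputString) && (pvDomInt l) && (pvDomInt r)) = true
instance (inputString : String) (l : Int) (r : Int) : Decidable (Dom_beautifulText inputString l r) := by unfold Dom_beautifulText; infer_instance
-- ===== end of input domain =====

-- B replaces A's per-start greedy rescans by prefix-sum arithmetic: divisibility of the total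
-- display length plus set membership of the block-boundary prefix values (objective: alternative).

-- ===== PORT A =====
-- inner 'for i in range(index+1, n)' loop of A, with early return/break
def aInner (ll : List Nat) (T : Nat) (l r : Int) (i : Nat) (sumLen : Nat) : Bool :=
  if h : i < ll.length then
    let s := sumLen + ll[i]
    if s = T then
      (if i = ll.length - 1 ∧ (T : Int) ≤ r ∧ (T : Int) ≥ l then true
       else aInner ll T l r (i+1) 0)
    else if T < s then false
    else aInner ll T l r (i+1) (s+1)
  else false
termination_by ll.length - i

-- outer 'while index < len(substringsLengths)-1' loop of A
def aOuter (ll : List Nat) (l r : Int) (index : Nat) : Bool :=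
  if index + 1 < ll.length then
    let T := (ll.take (index+1)).sum + index
    if aInner ll T l r (index+1) 0 then true else aOuter ll l r (index+1)
  else false
termination_by ll.length - index

def beautifulText (inputString : String) (l : Int) (r : Int) : Bool :=
  aOuter ((PySem.Chars.splitOn inputString.toList [' ']).map List.length) l r 0

-- ===== PORT B =====
def beautifulText_alt (inputString : String) (l : Int) (r : Int) : Bool :=
  let words := PySem.Chars.splitOn inputString.toList [' ']
  let n : Nat := words.length
  let p := words.foldl
    (fun (st : List Int × Int) w =>
      (st.1 ++ [st.2 + (w.length : Int) + 1], st.2 + (w.length : Int) + 1))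
    ([], -1)
  let cum := p.1
  let boundaries : PySem.Set Int := PySem.Set.ofList cum
  -- cum[-1]; cum is nonempty (split always yields at least one word), so the getD default is never used
  let L : Int := (PySem.List.pyGet? cum (-1)).getD 0
  (PySem.List.pyRange 0 ((n : Int) - 1) 1).any (fun idx =>
    let T : Int := PySem.List.pyGetD cum idx 0
    if l ≤ T ∧ T ≤ r ∧ PySem.Int.mod (L + 1) (T + 1) = 0 then
      let k := PySem.Int.floordiv (L + 1) (T + 1)
      (PySem.List.pyRange 1 (k + 1) 1).all (fun m =>
        PySem.Set.contains boundaries (m * (T + 1) - 1))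
    else false)

-- ===== PRECONDITION & SPEC =====
def Spec_beautifulText (inputString : String) (l : Int) (r : Int) (out : Bool) : Prop := out = beautifulText_alt inputString l r
instance (inputString : String) (l : Int) (r : Int) (out : Bool) : Decidable (Spec_beautifulText inputString l r out) := by unfold Spec_beautifulText; infer_instance

-- ===== CLAIM (what is proved, stated in full; the proofs are below) =====
def Claim_equal_beautifulText : Prop := ∀ (inputString : String) (l : Int) (r : Int), Dom_beautifulText inputString l r → Spec_beautifulText inputString l r (beautifulText inputString l r)

-- ===== LEMMAS AND PROOFS =====

-- pc ll i = display length of words 0..i joined by single spaces (A's currentTotalLength at index i)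
def pc (ll : List Nat) (i : Nat) : Nat := (ll.take (i+1)).sum + i

theorem pc_succ (ll : List Nat) (i : Nat) (h : i + 1 < ll.length) :
    pc ll (i+1) = pc ll i + 1 + ll[i+1] := by
  unfold pc
  rw [List.sum_take_succ ll (i+1) h]
  omega

theorem pc_lt_pc (ll : List Nat) {i j : Nat} (hij : i < j) (hj : j < ll.length) :
    pc ll i < pc ll j := by
  induction j with
  | zero => omega
  | succ k ih =>
    rw [pc_succ ll k hj]
    rcases Nat.lt_succ_iff_lt_or_eq.mp hij with h | h
    · have := ih h (by omega); omega
    · subst h; omega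

theorem pc_le_pc (ll : List Nat) {i j : Nat} (hij : i ≤ j) (hj : j < ll.length) :
    pc ll i ≤ pc ll j := by
  rcases Nat.lt_or_eq_of_le hij with h | h
  · exact Nat.le_of_lt (pc_lt_pc ll h hj)
  · subst h; rfl

theorem pc_pred (ll : List Nat) (i : Nat) (h : i < ll.length) (h0 : 0 < i) :
    pc ll i = pc ll (i-1) + 1 + ll[i] := by
  unfold pc
  rw [List.sum_take_succ ll i h]
  rw [show i - 1 + 1 = i from by omega]
  omega

theorem any_congr_mem {α : Type} {l : List α} {f g : α → Bool}
    (h : ∀ x ∈ l, f x = g x) : l.any f = l.any g := by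
  induction l with
  | nil => rfl
  | cons a t ih =>
    simp only [List.any_cons, h a (by simp), ih (fun x hx => h x (by simp [hx]))]

-- the chain of exact block boundaries A's greedy scan walks
def chain (ll : List Nat) (T : Nat) (l r : Int) (b : Nat) : Bool :=
  match hf : (List.range ll.length).find?
      (fun j => decide (b < j) && decide (pc ll j = pc ll b + T + 1)) with
  | none => false
  | some j =>
      if j = ll.length - 1 then decide ((T : Int) ≤ r ∧ (T : Int) ≥ l) else chain ll T l r j
termination_by ll.length - b
decreasing_by
  have h1 := List.find?_some hf
  have h2 := List.mem_of_find?_eq_some hf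
  simp only [Bool.and_eq_true, decide_eq_true_eq, List.mem_range] at h1 h2
  omega

theorem chain_eq_none {ll : List Nat} {T : Nat} {l r : Int} {b : Nat}
    (h : (List.range ll.length).find?
      (fun j => decide (b < j) && decide (pc ll j = pc ll b + T + 1)) = none) :
    chain ll T l r b = false := by
  rw [chain]
  split
  · rfl
  · rename_i j hf; rw [h] at hf; cases hf

theorem chain_eq_some {ll : List Nat} {T : Nat} {l r : Int} {b j : Nat}
    (h : (List.range ll.length).find?
      (fun j => decide (b < j) && decide (pc ll j = pc ll b + T + 1)) = some j) :
    chain ll T l r b =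
      (if j = ll.length - 1 then decide ((T : Int) ≤ r ∧ (T : Int) ≥ l) else chain ll T l r j) := by
  rw [chain]
  split
  · rename_i hf; rw [h] at hf; cases hf
  · rename_i j' hf; rw [h] at hf; injection hf with e; subst e; rfl

theorem find?_range_eq_some {n i : Nat} {p : Nat → Bool} (hi : i < n) (hp : p i = true)
    (hfirst : ∀ j < i, p j = false) : (List.range n).find? p = some i := by
  have hsplit : List.range n = List.range i ++ List.range' i (n - i) := by
    rw [List.range_eq_range', List.range_eq_range']
    have h := List.range'_append (s := 0) (m := i) (n := n - i) (step := 1)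
    simp only [Nat.mul_comm, Nat.mul_one, Nat.zero_add] at h
    have h2 : i + (n - i) = n := by omega
    rw [h2] at h
    exact h.symm
  rw [hsplit, List.find?_append]
  have h1 : (List.range i).find? p = none := by
    rw [List.find?_eq_none]; intro x hx; simp only [List.mem_range] at hx; simp [hfirst x hx]
  rw [h1]
  have h2 : n - i = (n - i - 1) + 1 := by omega
  rw [h2, List.range'_succ, List.find?_cons_of_pos hp]
  rfl

-- A's inner loop never succeeds once i is past the end
theorem aInner_ge (ll : List Nat) (T : Nat) (l r : Int) (i : Nat) (s : Nat)
    (h : ll.length ≤ i) : aInner ll T l r i s = false := by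
  unfold aInner
  rw [dif_neg (by omega)]

-- A's inner loop computes chain
theorem aInner_eq_chain (ll : List Nat) (T : Nat) (l r : Int) :
    ∀ fuel i b, ll.length - i ≤ fuel → b < i → i ≤ ll.length →
    (∀ j, b < j → j < i → pc ll j < pc ll b + T + 1) →
    aInner ll T l r i (pc ll (i-1) - pc ll b) = chain ll T l r b := by
  intro fuel
  induction fuel with
  | zero =>
    intro i b hf hbi hin hinv
    have hi : i = ll.length := by omega
    rw [aInner_ge ll T l r i _ (by omega)]
    have hnone : (List.range ll.length).find?
        (fun j => decide (b < j) && decide (pc ll j = pc ll b + T + 1)) = none := by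
      rw [List.find?_eq_none]
      intro x hx
      simp only [List.mem_range] at hx
      simp only [Bool.and_eq_true, decide_eq_true_eq, not_and]
      intro hbx
      have := hinv x hbx (by omega)
      omega
    rw [chain_eq_none hnone]
  | succ fuel ih =>
    intro i b hf hbi hin hinv
    by_cases hi : i < ll.length
    · -- unfold one step of aInner
      have hpcb_lt : pc ll b < pc ll i := pc_lt_pc ll hbi hi
      have hstep : pc ll i = pc ll (i-1) + 1 + ll[i] := pc_pred ll i hi (by omega)
      have hpcb_le : pc ll b ≤ pc ll (i-1) := pc_le_pc ll (by omega) (by omega)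
      have hs : pc ll (i-1) - pc ll b + ll[i] = pc ll i - pc ll b - 1 := by omega
      rw [aInner, dif_pos hi]
      simp only [hs]
      by_cases hb : pc ll i = pc ll b + T + 1
      · -- boundary hit at i
        have hsT : pc ll i - pc ll b - 1 = T := by omega
        rw [if_pos hsT]
        have hfind : (List.range ll.length).find?
            (fun j => decide (b < j) && decide (pc ll j = pc ll b + T + 1)) = some i := by
          apply find?_range_eq_some hi
          · simp [hbi, hb]
          · intro j hj
            simp only [Bool.and_eq_false_iff, decide_eq_false_iff_not]
            by_cases hbj : b < j
            · right; have := hinv j hbj hj; omega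
            · left; omega
        rw [chain_eq_some hfind]
        by_cases hlast : i = ll.length - 1
        · rw [if_pos hlast]
          by_cases hrange : (T : Int) ≤ r ∧ (T : Int) ≥ l
          · rw [if_pos ⟨hlast, hrange.1, hrange.2⟩]
            simp [hrange.1, hrange.2]
          · rw [if_neg (by tauto)]
            have : aInner ll T l r (i+1) 0 = false := aInner_ge ll T l r (i+1) 0 (by omega)
            rw [this]
            symm
            simp only [decide_eq_false_iff_not]
            tauto
        · rw [if_neg hlast]
          rw [if_neg (by tauto)]
          have h0 : pc ll (i+1-1) - pc ll i = 0 := by simp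
          calc aInner ll T l r (i+1) 0
              = aInner ll T l r (i+1) (pc ll (i+1-1) - pc ll i) := by rw [h0]
            _ = chain ll T l r i := by
                apply ih (i+1) i (by omega) (by omega) (by omega)
                intro j hj1 hj2; omega
      · by_cases hlt : pc ll i < pc ll b + T + 1
        · -- still inside the block
          have hsT : ¬ (pc ll i - pc ll b - 1 = T) := by omega
          have hsgt : ¬ (T < pc ll i - pc ll b - 1) := by omega
          rw [if_neg hsT, if_neg hsgt]
          have h1 : pc ll i - pc ll b - 1 + 1 = pc ll (i+1-1) - pc ll b := by
            simp only [Nat.add_sub_cancel]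
            omega
          rw [h1]
          apply ih (i+1) b (by omega) (by omega) (by omega)
          intro j hj1 hj2
          rcases Nat.lt_succ_iff_lt_or_eq.mp hj2 with h | h
          · exact hinv j hj1 h
          · subst h; omega
        · -- overshoot: break
          have hsT : ¬ (pc ll i - pc ll b - 1 = T) := by omega
          have hsgt : T < pc ll i - pc ll b - 1 := by omega
          rw [if_neg hsT, if_pos hsgt]
          have hnone : (List.range ll.length).find?
              (fun j => decide (b < j) && decide (pc ll j = pc ll b + T + 1)) = none := by
            rw [List.find?_eq_none]
            intro x hx
            simp only [List.mem_range] at hx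
            simp only [Bool.and_eq_true, decide_eq_true_eq, not_and]
            intro hbx hc
            by_cases hxi : x < i
            · have := hinv x hbx hxi; omega
            · have : pc ll i ≤ pc ll x := pc_le_pc ll (by omega) hx
              omega
          rw [chain_eq_none hnone]
    · rw [aInner_ge ll T l r i _ (by omega)]
      have hnone : (List.range ll.length).find?
          (fun j => decide (b < j) && decide (pc ll j = pc ll b + T + 1)) = none := by
        rw [List.find?_eq_none]
        intro x hx
        simp only [List.mem_range] at hx
        simp only [Bool.and_eq_true, decide_eq_true_eq, not_and]
        intro hbx
        have := hinv x hbx (by omega)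
        omega
      rw [chain_eq_none hnone]

-- the arithmetic characterisation of chain: the remaining words split into blocks of display length T
def RrelB (ll : List Nat) (T : Nat) (l r : Int) (b : Nat) : Bool :=
  decide (((T : Int) ≤ r ∧ (T : Int) ≥ l) ∧
    (T + 1) ∣ (pc ll (ll.length - 1) - pc ll b) ∧
    pc ll b < pc ll (ll.length - 1) ∧
    ∀ m < pc ll (ll.length - 1) + 1, 1 ≤ m → pc ll b + m * (T + 1) ≤ pc ll (ll.length - 1) →
      ∃ j < ll.length, pc ll j = pc ll b + m * (T + 1))

theorem chain_eq_RrelB (ll : List Nat) (T : Nat) (l r : Int) :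
    ∀ fuel b, ll.length - b ≤ fuel → b < ll.length →
    chain ll T l r b = RrelB ll T l r b := by
  intro fuel
  induction fuel with
  | zero => intro b hfu hb; omega
  | succ fuel ih =>
    intro b hfu hb
    have hlastlt : ll.length - 1 < ll.length := by omega
    match hfind : (List.range ll.length).find?
        (fun j => decide (b < j) && decide (pc ll j = pc ll b + T + 1)) with
    | none =>
      rw [chain_eq_none hfind]
      symm
      simp only [RrelB, decide_eq_false_iff_not]
      rintro ⟨-, ⟨q, hq⟩, hlt, hall⟩
      have hq1 : 1 ≤ q := by
        rcases Nat.eq_zero_or_pos q with h | h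
        · subst h; omega
        · exact h
      have hm1 : (T + 1) * 1 ≤ (T + 1) * q := Nat.mul_le_mul_left _ hq1
      have hble : pc ll b ≤ pc ll (ll.length - 1) := by omega
      obtain ⟨j, hj, hpcj⟩ := hall 1 (by omega) (by omega) (by omega)
      have hbj : b < j := by
        by_contra hc
        have : pc ll j ≤ pc ll b := pc_le_pc ll (by omega) hb
        omega
      have h2 := List.find?_eq_none.mp hfind j (by simp [hj])
      simp only [Bool.and_eq_true, decide_eq_true_eq, not_and] at h2
      have := h2 hbj
      omega
    | some j =>
      have hp := List.find?_some hfind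
      have hjmem := List.mem_of_find?_eq_some hfind
      simp only [Bool.and_eq_true, decide_eq_true_eq] at hp
      simp only [List.mem_range] at hjmem
      obtain ⟨hbj, hpcj⟩ := hp
      rw [chain_eq_some hfind]
      by_cases hjlast : j = ll.length - 1
      · rw [if_pos hjlast]
        subst hjlast
        symm
        simp only [RrelB]
        rw [decide_eq_decide]
        constructor
        · rintro ⟨hrange, -⟩; exact hrange
        · intro hrange
          refine ⟨hrange, ⟨1, by omega⟩, by omega, ?_⟩
          intro m hmb hm1 hmle
          rcases Nat.lt_or_ge m 2 with hm2 | hm2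
          · have hm : m = 1 := by omega
            subst hm
            exact ⟨ll.length - 1, hlastlt, by omega⟩
          · have : 2 * (T + 1) ≤ m * (T + 1) := Nat.mul_le_mul_right _ hm2
            omega
      · rw [if_neg hjlast]
        have hjlt : j < ll.length - 1 := by omega
        rw [ih j (by omega) (by omega)]
        have hjltL : pc ll j < pc ll (ll.length - 1) := pc_lt_pc ll hjlt hlastlt
        simp only [RrelB]
        rw [decide_eq_decide]
        constructor
        · rintro ⟨hrange, ⟨q, hq⟩, hlt, hall⟩
          have hble : pc ll j ≤ pc ll (ll.length - 1) := by omega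
          refine ⟨hrange, ⟨q + 1, by rw [Nat.mul_add]; omega⟩, by omega, ?_⟩
          intro m hmb hm1 hmle
          rcases Nat.lt_or_ge m 2 with hm2 | hm2
          · have hm : m = 1 := by omega
            subst hm
            exact ⟨j, by omega, by omega⟩
          · have hrec : (m - 1) * (T + 1) + (T + 1) = m * (T + 1) := by
              have h := Nat.succ_pred_eq_of_pos (show 0 < m - 1 + 1 by omega)
              calc (m - 1) * (T + 1) + (T + 1) = (m - 1 + 1) * (T + 1) := by rw [Nat.succ_mul]
                _ = m * (T + 1) := by rw [show m - 1 + 1 = m from by omega]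
            have hb1 : m - 1 < pc ll (ll.length - 1) + 1 := by omega
            obtain ⟨j', hj', hpcj'⟩ := hall (m - 1) hb1 (by omega) (by omega)
            exact ⟨j', hj', by omega⟩
        · rintro ⟨hrange, ⟨q, hq⟩, hlt, hall⟩
          have hble : pc ll b ≤ pc ll (ll.length - 1) := by omega
          have hq1 : 1 ≤ q := by
            rcases Nat.eq_zero_or_pos q with h | h
            · subst h; omega
            · exact h
          refine ⟨hrange, ⟨q - 1, ?_⟩, hjltL, ?_⟩
          · have : (T + 1) * (q - 1) + (T + 1) = (T + 1) * q := by
              calc (T + 1) * (q - 1) + (T + 1) = (T + 1) * (q - 1 + 1) := by rw [Nat.mul_succ]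
                _ = (T + 1) * q := by rw [show q - 1 + 1 = q from by omega]
            omega
          · intro m hmb hm1 hmle
            have hrec : (m + 1) * (T + 1) = m * (T + 1) + (T + 1) := by rw [Nat.succ_mul]
            have hmm : m + 1 ≤ (m + 1) * (T + 1) := Nat.le_mul_of_pos_right _ (by omega)
            obtain ⟨j', hj', hpcj'⟩ := hall (m + 1) (by omega) (by omega) (by omega)
            exact ⟨j', hj', by omega⟩

-- A's outer loop, as an any over the start indices
theorem aOuter_eq_any (ll : List Nat) (l r : Int) :
    ∀ fuel j, ll.length - j ≤ fuel →
    aOuter ll l r j =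
      (List.range' j (ll.length - 1 - j)).any
        (fun idx => chain ll (pc ll idx) l r idx) := by
  intro fuel
  induction fuel with
  | zero =>
    intro j hfu
    rw [aOuter, if_neg (by omega)]
    rw [show ll.length - 1 - j = 0 from by omega]
    rfl
  | succ fuel ih =>
    intro j hfu
    by_cases hj : j + 1 < ll.length
    · rw [aOuter, if_pos hj]
      show (if aInner ll ((List.take (j+1) ll).sum + j) l r (j+1) 0 = true then true
        else aOuter ll l r (j+1)) = _
      have hInner : aInner ll ((ll.take (j+1)).sum + j) l r (j+1) 0 = chain ll (pc ll j) l r j := by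
        have h := aInner_eq_chain ll (pc ll j) l r ll.length (j+1) j (by omega) (by omega)
          (by omega) (fun j' h1 h2 => by omega)
        simpa [pc] using h
      rw [hInner]
      rw [show ll.length - 1 - j = (ll.length - 1 - (j+1)) + 1 from by omega, List.range'_succ]
      rw [List.any_cons]
      rw [ih (j+1) (by omega)]
      cases chain ll (pc ll j) l r j <;> simp
    · rw [aOuter, if_neg hj]
      rw [show ll.length - 1 - j = 0 from by omega]
      rfl

-- the cum-building fold of B: element i is pc of the length list, shifted by t + 1
theorem fold_cum (ws : List (List Char)) : ∀ (acc : List Int) (t : Int),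
    (ws.foldl (fun (st : List Int × Int) w =>
      (st.1 ++ [st.2 + (w.length : Int) + 1], st.2 + (w.length : Int) + 1)) (acc, t)).1
    = acc ++ (List.range ws.length).map
        (fun i => t + 1 + ((((ws.map List.length).take (i+1)).sum + i : Nat) : Int)) := by
  induction ws with
  | nil => intro acc t; simp
  | cons w ws ih =>
    intro acc t
    simp only [List.foldl_cons]
    rw [ih]
    simp only [List.length_cons, List.range_succ_eq_map, List.map_cons, List.map_map]
    rw [List.append_assoc]
    congr 1
    rw [List.singleton_append]
    congr 1
    · simp only [List.take_succ_cons, List.take_zero, List.sum_cons, List.sum_nil]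
      push_cast
      ring
    · apply List.map_congr_left
      intro i _
      simp only [Function.comp_apply, Nat.succ_eq_add_one, List.take_succ_cons, List.sum_cons]
      push_cast
      ring

-- membership in the cum list, as existence of a prefix index
theorem mem_cum_iff (ll : List Nat) (N : Nat) (v : Int) :
    (v ∈ (List.range N).map (fun i => ((pc ll i : Nat) : Int))) ↔ ∃ j < N, (pc ll j : Int) = v := by
  simp only [List.mem_map, List.mem_range]

-- pointwise equality of B's arithmetic test with RrelB at index k
theorem boundary_check_eq (ll : List Nat) (k : Nat) (hk : k + 1 < ll.length) (l r : Int) :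
    (if l ≤ ((pc ll k : Nat) : Int) ∧ ((pc ll k : Nat) : Int) ≤ r ∧
        PySem.Int.mod (((pc ll (ll.length - 1) : Nat) : Int) + 1) (((pc ll k : Nat) : Int) + 1) = 0 then
      (PySem.List.pyRange 1
          (PySem.Int.floordiv (((pc ll (ll.length - 1) : Nat) : Int) + 1)
            (((pc ll k : Nat) : Int) + 1) + 1)).all
        (fun m => PySem.Set.contains
          (PySem.Set.ofList ((List.range ll.length).map (fun i => ((pc ll i : Nat) : Int))))
          (m * ((((pc ll k : Nat) : Int)) + 1) - 1))
    else false) = RrelB ll (pc ll k) l r k := by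
  set Tn := pc ll k with hTn
  set Ln := pc ll (ll.length - 1) with hLn
  have hTL : Tn < Ln := pc_lt_pc ll (by omega) (by omega)
  by_cases hcond : l ≤ (Tn : Int) ∧ (Tn : Int) ≤ r ∧
      PySem.Int.mod ((Ln : Int) + 1) ((Tn : Int) + 1) = 0
  · rw [if_pos hcond]
    obtain ⟨hl, hr, hmod⟩ := hcond
    have hdvdI : ((Tn : Int) + 1) ∣ ((Ln : Int) + 1) := (PySem.Int.mod_eq_zero_iff_dvd _ _).mp hmod
    have hdvdN : (Tn + 1) ∣ (Ln + 1) := by exact_mod_cast hdvdI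
    obtain ⟨q, hq⟩ := hdvdN
    have hq2 : 2 ≤ q := by
      by_contra hc
      have : (Tn + 1) * q ≤ (Tn + 1) * 1 := Nat.mul_le_mul_left _ (by omega)
      omega
    have hfd : PySem.Int.floordiv ((Ln : Int) + 1) ((Tn : Int) + 1) = (q : Int) := by
      rw [PySem.Int.floordiv_eq_ediv_of_pos (by positivity)]
      rw [show ((Ln : Int) + 1) = ((Tn : Int) + 1) * (q : Int) from by exact_mod_cast hq]
      exact Int.mul_ediv_cancel_left _ (by positivity)
    rw [hfd]
    rw [PySem.List.pyRange_one]
    rw [List.all_map]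
    rw [show ((q : Int) + 1 - 1).toNat = q from by omega]
    rw [Bool.eq_iff_iff]
    simp only [RrelB, List.all_eq_true, List.mem_range, Function.comp_apply,
      PySem.Set.contains_iff, PySem.Set.mem_ofList, mem_cum_iff, decide_eq_true_eq]
    constructor
    · intro hall
      refine ⟨⟨hr, hl⟩, ⟨q - 1, ?_⟩, hTL, ?_⟩
      · have h1 : (Tn + 1) * (q - 1) + (Tn + 1) = (Tn + 1) * q := by
          calc (Tn + 1) * (q - 1) + (Tn + 1) = (Tn + 1) * (q - 1 + 1) := by rw [Nat.mul_succ]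
            _ = (Tn + 1) * q := by rw [show q - 1 + 1 = q from by omega]
        omega
      · intro m hmb hm1 hmle
        have hmq : m < q := by
          by_contra hc
          have : (Tn + 1) * q ≤ (Tn + 1) * m := Nat.mul_le_mul_left _ (by omega)
          have h2 : m * (Tn + 1) = (Tn + 1) * m := Nat.mul_comm _ _
          omega
        obtain ⟨j, hj, he⟩ := hall m hmq
        refine ⟨j, hj, ?_⟩
        have hv : ((1 : Int) + (m : Int)) * ((Tn : Int) + 1) - 1
            = ((Tn + m * (Tn + 1) : Nat) : Int) := by push_cast; ring
        rw [hv] at he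
        exact_mod_cast he
    · rintro ⟨-, -, -, hall⟩
      intro mm hmm
      rcases Nat.eq_zero_or_pos mm with h0 | h0
      · subst h0
        refine ⟨k, by omega, ?_⟩
        push_cast
        ring
      · have hble : mm + 1 ≤ q := by omega
        have hmul : (Tn + 1) * (mm + 1) ≤ (Tn + 1) * q := Nat.mul_le_mul_left _ hble
        have hexp : (Tn + 1) * (mm + 1) = (Tn + 1) * mm + (Tn + 1) := by rw [Nat.mul_succ]
        have hcomm : mm * (Tn + 1) = (Tn + 1) * mm := Nat.mul_comm _ _
        have hq' : q ≤ (Tn + 1) * q := Nat.le_mul_of_pos_left _ (by omega)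
        obtain ⟨j, hj, he⟩ := hall mm (by omega) (by omega) (by omega)
        refine ⟨j, hj, ?_⟩
        rw [he]
        push_cast
        ring
  · rw [if_neg hcond]
    symm
    simp only [RrelB, decide_eq_false_iff_not]
    rintro ⟨⟨hr, hl⟩, ⟨q, hq⟩, hlt, -⟩
    apply hcond
    refine ⟨hl, hr, ?_⟩
    rw [PySem.Int.mod_eq_zero_iff_dvd]
    have hsum : Ln + 1 = (Tn + 1) * (q + 1) := by
      have : (Tn + 1) * (q + 1) = (Tn + 1) * q + (Tn + 1) := by rw [Nat.mul_succ]
      omega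
    exact ⟨((q : Int) + 1), by exact_mod_cast hsum⟩

-- the B port, reduced to RrelB
theorem alt_eq_any (inputString : String) (l r : Int) :
    beautifulText_alt inputString l r =
      (List.range (((PySem.Chars.splitOn inputString.toList [' ']).map List.length).length - 1)).any
        (fun idx => RrelB ((PySem.Chars.splitOn inputString.toList [' ']).map List.length)
          (pc ((PySem.Chars.splitOn inputString.toList [' ']).map List.length) idx) l r idx) := by
  set ws := PySem.Chars.splitOn inputString.toList [' '] with hws
  set ll := ws.map List.length with hll
  have hlen : ll.length = ws.length := by simp [hll]
  unfold beautifulText_alt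
  rw [← hws]
  simp only []
  rw [fold_cum ws [] (-1)]
  rw [List.nil_append]
  have hcum : (List.range ws.length).map
        (fun i => (-1 : Int) + 1 + ((((ws.map List.length).take (i+1)).sum + i : Nat) : Int))
      = (List.range ws.length).map (fun i => ((pc ll i : Nat) : Int)) := by
    apply List.map_congr_left
    intro i _
    rw [← hll]
    simp only [pc]
    push_cast
    ring
  rw [hcum]
  set cum := (List.range ws.length).map (fun i => ((pc ll i : Nat) : Int)) with hcumdef
  by_cases hn : ws.length = 0
  · rw [hn, hlen, hn]
    simp [PySem.List.pyRange]
  · -- N ≥ 1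
    have hN1 : 1 ≤ ws.length := by omega
    have hcumlen : cum.length = ws.length := by simp [hcumdef]
    have hL : (PySem.List.pyGet? cum (-1)).getD 0 = ((pc ll (ll.length - 1) : Nat) : Int) := by
      rw [hcumdef]
      simp only [PySem.List.pyGet?, PySem.List.pyIdx?, List.length_map, List.length_range]
      rw [if_neg (by omega), if_pos (by omega)]
      simp only [Option.bind_some, List.getElem?_map, List.getElem?_range (by omega : ws.length - (-(-1:Int)).toNat < ws.length)]
      simp only [Option.map_some, Option.getD_some]
      congr 2
      omega
    rw [hL]
    rw [PySem.List.pyRange_one]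
    rw [List.any_map]
    have htn : ((ws.length : Int) - 1 - 0).toNat = ll.length - 1 := by omega
    rw [htn]
    apply any_congr_mem
    intro k hk
    simp only [List.mem_range] at hk
    simp only [Function.comp_apply]
    have hT : PySem.List.pyGetD cum (0 + (k : Int)) 0 = ((pc ll k : Nat) : Int) := by
      rw [hcumdef]
      simp only [PySem.List.pyGetD, PySem.List.pyGet?, PySem.List.pyIdx?, List.length_map,
        List.length_range]
      rw [if_pos (by omega), if_pos (by omega)]
      simp only [Option.bind_some, List.getElem?_map]
      rw [List.getElem?_range (by omega : ((0:Int) + (k:Int)).toNat < ws.length)]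
      simp only [Option.map_some, Option.getD_some]
      congr 2
      omega
    rw [hT, hcumdef, ← hlen]
    -- now both sides are about Tn := pc ll k, Ln := pc ll (ll.length - 1)
    exact boundary_check_eq ll k (by omega) l r

-- ===== VERDICT (by name: the statement is the Claim_ definition above) =====
theorem beautifulText_spec : Claim_equal_beautifulText := by
  intro s l r _
  unfold Spec_beautifulText beautifulText
  set ll := (PySem.Chars.splitOn s.toList [' ']).map List.length with hll
  rw [alt_eq_any s l r, ← hll]
  rw [aOuter_eq_any ll l r ll.length 0 (by omega)]
  rw [List.range_eq_range']
  simp only [Nat.sub_zero]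
  apply any_congr_mem
  intro idx hidx
  have hmem : idx < ll.length - 1 := by
    have := List.mem_range'.mp hidx; omega
  rw [chain_eq_RrelB ll (pc ll idx) l r ll.length idx (by omega) (by omega)]
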